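-- pv_equiv track=rewrite | github.com/PeiweiHu/cinspector | cinspector/nodes/node.py | point2index
-- ===== SOURCE A (Python) =====
-- from typing import Dict, Optional, Iterable, TYPE_CHECKING
--
-- def point2index(s: str, row: int, col: int) -> Optional[int]:
--     """ return the character index at the specified row and column in the string s.
--
--     Args:
--         s (str): a string
--         row (int): row, start from 0
--         col (int): column, start from 0
--
--     Return:
--         the character index, or None if it fails
--     """
--
--     lines = s.split('\n')
--     if row < 0 or row >= len(lines):
--         return None
--     if col < 0 or col >= len(lines[row]):
--         return None
--
--     index = sum(len(line) + 1 for line in lines[:row])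
--     return index + col
-- ===== SOURCE B (Python) =====
-- def point2index(s: str, row: int, col: int):
--     """Single forward scan: walk past `row` newlines, then measure the current line."""
--     if row < 0 or col < 0:
--         return None
--     i = 0
--     r = row
--     while r > 0:            # advance to the index just after the r-th newline
--         if i >= len(s):
--             return None     # string ends before `row` newlines are seen
--         if s[i] == '\n':
--             r -= 1
--         i += 1
--     start = i
--     end = start
--     while end < len(s) and s[end] != '\n':
--         end += 1
--     if col >= end - start:
--         return None
--     return start + col
-- ===== Notes on version B (the rewrite author's own statement) =====
-- stated objective: alternative
-- what changed: B replaces A's split-into-all-lines plus prefix-length sum by a single forward scan that walks past `row` newlines to find the line start and then measures the current line, never building the line list.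
import Mathlib
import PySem

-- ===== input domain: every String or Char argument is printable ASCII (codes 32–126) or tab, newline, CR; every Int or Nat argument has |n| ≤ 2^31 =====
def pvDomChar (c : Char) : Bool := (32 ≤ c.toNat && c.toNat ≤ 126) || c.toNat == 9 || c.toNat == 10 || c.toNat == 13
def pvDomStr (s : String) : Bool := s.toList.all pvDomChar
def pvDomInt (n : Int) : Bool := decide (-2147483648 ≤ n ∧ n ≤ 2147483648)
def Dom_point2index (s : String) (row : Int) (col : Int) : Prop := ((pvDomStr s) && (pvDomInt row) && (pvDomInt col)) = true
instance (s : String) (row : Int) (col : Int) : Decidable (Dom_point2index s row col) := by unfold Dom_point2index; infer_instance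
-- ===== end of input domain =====

-- B replaces split-all-lines-and-sum-prefixes by a single forward scan past `row`
-- newlines (objective: alternative decomposition, same asymptotic cost, no line list built).

-- ===== PORT A =====
-- lines = s.split('\n'); guard row; guard col against len(lines[row]); sum(len(line)+1 for line in lines[:row]) + col
def point2index (s : String) (row : Int) (col : Int) : Option Int :=
  let lines := PySem.Chars.splitOn s.toList ['\n']
  if row < 0 ∨ (lines.length : Int) ≤ row then none
  else
    if col < 0 ∨ ((PySem.List.pyGetD lines row []).length : Int) ≤ col then none
    else
      let index : Int := ((PySem.List.slice lines none (some row)).map (fun line => (line.length : Int) + 1)).sum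
      some (index + col)

-- ===== PORT B =====
-- _line_start(s, i, r): index just after the r-th newline, walking the suffix of s one char at a time
def lineStart (cs : List Char) (r : Int) (i : Nat) : Option (Nat × List Char) :=
  if r = 0 then some (i, cs)
  else match cs with
    | [] => none
    | c :: rest => if c = '\n' then lineStart rest (r - 1) (i + 1) else lineStart rest r (i + 1)

-- the `while end < len(s) and s[end] != '\n'` loop: length of the current line
def lineLen (cs : List Char) : Nat :=
  match cs with
  | [] => 0
  | c :: rest => if c = '\n' then 0 else lineLen rest + 1

def point2index_alt (s : String) (row : Int) (col : Int) : Option Int :=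
  if row < 0 ∨ col < 0 then none
  else match lineStart s.toList row 0 with
    | none => none
    | some (start, rest) =>
      if (lineLen rest : Int) ≤ col then none
      else some ((start : Int) + col)

-- ===== PRECONDITION & SPEC =====
def Spec_point2index (s : String) (row : Int) (col : Int) (out : Option Int) : Prop := out = point2index_alt s row col
instance (s : String) (row : Int) (col : Int) (out : Option Int) : Decidable (Spec_point2index s row col out) := by unfold Spec_point2index; infer_instance

-- ===== CLAIM (what is proved, stated in full; the proofs are below) =====
def Claim_equal_point2index : Prop := ∀ (s : String) (row : Int) (col : Int), Dom_point2index s row col → Spec_point2index s row col (point2index s row col)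

-- ===== LEMMAS AND PROOFS =====

-- proof-side reference splitter on a single-char separator
def split1 (cs : List Char) : List (List Char) :=
  match cs with
  | [] => [[]]
  | c :: rest =>
    if c = '\n' then [] :: split1 rest
    else match split1 rest with
      | [] => [[c]]
      | h :: t => (c :: h) :: t

lemma split1_ne_nil (cs : List Char) : split1 cs ≠ [] := by
  cases cs with
  | nil => simp [split1]
  | cons c rest =>
    simp only [split1]
    split_ifs
    · simp
    · cases h : split1 rest <;> simp

lemma go_spec (fuel : Nat) (l cur : List Char) (acc : List (List Char)) (h : l.length ≤ fuel) :
    PySem.Chars.splitOn.go ['\n'] fuel l cur acc =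
      acc.reverse ++ ((cur.reverse ++ (split1 l).headI) :: (split1 l).tail) := by
  induction fuel generalizing l cur acc with
  | zero =>
    have : l = [] := by cases l <;> simp_all
    subst this
    simp [PySem.Chars.splitOn.go, split1]
  | succ fuel ih =>
    cases l with
    | nil => simp [PySem.Chars.splitOn.go, split1]
    | cons c rest =>
      simp only [PySem.Chars.splitOn.go]
      by_cases hc : c = '\n'
      · subst hc
        rw [if_pos (by simp [List.isPrefixOf])]
        rw [ih _ _ _ (by simpa using Nat.le_of_succ_le_succ h)]
        simp [split1]
        obtain ⟨h0, t0, he⟩ : ∃ h0 t0, split1 rest = h0 :: t0 := by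
          cases hs : split1 rest with
          | nil => exact absurd hs (split1_ne_nil rest)
          | cons a b => exact ⟨a, b, rfl⟩
        simp [he]
      · rw [if_neg (by simp [List.isPrefixOf]; exact fun h => hc h.symm)]
        rw [ih _ _ _ (by simpa using Nat.le_of_succ_le_succ h)]
        obtain ⟨h0, t0, he⟩ : ∃ h0 t0, split1 rest = h0 :: t0 := by
          cases hs : split1 rest with
          | nil => exact absurd hs (split1_ne_nil rest)
          | cons a b => exact ⟨a, b, rfl⟩
        simp [split1, hc, he]

lemma splitOn_eq_split1 (cs : List Char) : PySem.Chars.splitOn cs ['\n'] = split1 cs := by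
  rw [PySem.Chars.splitOn]
  rw [go_spec _ _ _ _ (by omega)]
  obtain ⟨h0, t0, he⟩ : ∃ h0 t0, split1 cs = h0 :: t0 := by
    cases hs : split1 cs with
    | nil => exact absurd hs (split1_ne_nil cs)
    | cons a b => exact ⟨a, b, rfl⟩
  simp [he]

def prefixLen (r : Nat) (cs : List Char) : Nat :=
  (((split1 cs).take r).map (fun l => l.length + 1)).sum

lemma lineStart_lt (cs : List Char) (r : Nat) (i : Nat) (h : r < (split1 cs).length) :
    lineStart cs (r : Int) i = some (i + prefixLen r cs, cs.drop (prefixLen r cs)) := by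
  induction cs generalizing r i with
  | nil =>
    have : r = 0 := by simp [split1] at h; omega
    subst this
    simp [lineStart, prefixLen]
  | cons c rest ih =>
    cases r with
    | zero => simp [lineStart, prefixLen]
    | succ r' =>
      rw [lineStart, if_neg (by push_cast; omega : ¬(((r'+1:Nat) : Int) = 0))]
      by_cases hc : c = '\n'
      · subst hc
        rw [if_pos rfl, show ((r'+1:Nat) : Int) - 1 = ((r' : Nat) : Int) by push_cast; ring]
        rw [ih r' (i+1) (by simp [split1] at h; omega)]
        have hp : prefixLen (r'+1) ('\n'::rest) = prefixLen r' rest + 1 := by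
          simp [prefixLen, split1]; omega
        rw [hp]
        simp only [List.drop_succ_cons, Option.some.injEq, Prod.mk.injEq]
        exact ⟨by omega, trivial⟩
      · obtain ⟨h0, t0, he⟩ : ∃ h0 t0, split1 rest = h0 :: t0 := by
          cases hs : split1 rest with
          | nil => exact absurd hs (split1_ne_nil rest)
          | cons a b => exact ⟨a, b, rfl⟩
        have hs1 : split1 (c::rest) = (c :: h0) :: t0 := by simp [split1, hc, he]
        rw [if_neg hc]
        rw [ih (r'+1) (i+1) (by rw [he]; rw [hs1] at h; simpa using h)]
        have hp : prefixLen (r'+1) (c::rest) = prefixLen (r'+1) rest + 1 := by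
          simp [prefixLen, hs1, he]; omega
        rw [hp]
        simp only [List.drop_succ_cons, Option.some.injEq, Prod.mk.injEq]
        exact ⟨by omega, trivial⟩

lemma lineStart_ge (cs : List Char) (r : Nat) (i : Nat) (h : (split1 cs).length ≤ r) :
    lineStart cs (r : Int) i = none := by
  induction cs generalizing r i with
  | nil =>
    have h1 : r ≠ 0 := by simp [split1] at h; omega
    rw [lineStart, if_neg (by exact_mod_cast h1)]
  | cons c rest ih =>
    by_cases hc : c = '\n'
    · subst hc
      have h2 : (split1 rest).length + 1 ≤ r := by simpa [split1] using h
      cases r with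
      | zero => omega
      | succ r' =>
        rw [lineStart, if_neg (by push_cast; omega : ¬(((r'+1:Nat) : Int) = 0)), if_pos rfl,
          show ((r'+1:Nat) : Int) - 1 = ((r' : Nat) : Int) by push_cast; ring]
        exact ih r' (i+1) (by omega)
    · obtain ⟨h0, t0, he⟩ : ∃ h0 t0, split1 rest = h0 :: t0 := by
        cases hs : split1 rest with
        | nil => exact absurd hs (split1_ne_nil rest)
        | cons a b => exact ⟨a, b, rfl⟩
      have hs1 : split1 (c::rest) = (c :: h0) :: t0 := by simp [split1, hc, he]
      have hr : r ≠ 0 := by rw [hs1] at h; simp at h; omega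
      rw [lineStart, if_neg (by exact_mod_cast hr), if_neg hc]
      exact ih r (i+1) (by rw [he]; rw [hs1] at h; simpa using h)

lemma lineLen_eq (cs : List Char) : lineLen cs = (split1 cs).headI.length := by
  induction cs with
  | nil => simp [lineLen, split1]
  | cons c rest ih =>
    by_cases hc : c = '\n'
    · subst hc; simp [lineLen, split1]
    · obtain ⟨h0, t0, he⟩ : ∃ h0 t0, split1 rest = h0 :: t0 := by
        cases hs : split1 rest with
        | nil => exact absurd hs (split1_ne_nil rest)
        | cons a b => exact ⟨a, b, rfl⟩
      simp [lineLen, split1, hc, ih, he]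

lemma split1_drop (cs : List Char) (r : Nat) (h : r < (split1 cs).length) :
    split1 (cs.drop (prefixLen r cs)) = (split1 cs).drop r := by
  induction cs generalizing r with
  | nil =>
    have : r = 0 := by simp [split1] at h; omega
    subst this; simp [prefixLen]
  | cons c rest ih =>
    cases r with
    | zero => simp [prefixLen]
    | succ r' =>
      by_cases hc : c = '\n'
      · subst hc
        have hp : prefixLen (r'+1) ('\n'::rest) = prefixLen r' rest + 1 := by
          simp [prefixLen, split1]; omega
        rw [hp, List.drop_succ_cons, ih r' (by simp [split1] at h; omega)]
        simp [split1]
      · obtain ⟨h0, t0, he⟩ : ∃ h0 t0, split1 rest = h0 :: t0 := by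
          cases hs : split1 rest with
          | nil => exact absurd hs (split1_ne_nil rest)
          | cons a b => exact ⟨a, b, rfl⟩
        have hs1 : split1 (c::rest) = (c :: h0) :: t0 := by simp [split1, hc, he]
        have hp : prefixLen (r'+1) (c::rest) = prefixLen (r'+1) rest + 1 := by
          simp [prefixLen, hs1, he]; omega
        rw [hp, List.drop_succ_cons, ih (r'+1) (by rw [he]; rw [hs1] at h; simpa using h)]
        simp [hs1, he]

lemma getD_eq_headI_drop (ls : List (List Char)) (r : Nat) (h : r < ls.length) :
    ls.getD r [] = (ls.drop r).headI := by
  induction ls generalizing r with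
  | nil => simp at h
  | cons a t ih =>
    cases r with
    | zero => simp
    | succ r' => simp only [List.getD_cons_succ, List.drop_succ_cons]; exact ih r' (by simpa using h)

lemma sum_map_cast (ls : List (List Char)) :
    ((ls.map (fun l => (l.length : Int) + 1)).sum) = ((ls.map (fun l => l.length + 1)).sum : Nat) := by
  induction ls with
  | nil => simp
  | cons a t ih => simp [ih]

-- ===== VERDICT (by name: the statement is the Claim_ definition above) =====
theorem point2index_spec : Claim_equal_point2index := by
  intro s row col _
  unfold Spec_point2index point2index point2index_alt
  simp only [splitOn_eq_split1]
  by_cases hr : row < 0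
  · simp [hr]
  by_cases hc : col < 0
  · by_cases hL : ((split1 s.toList).length : Int) ≤ row
    · simp [hr, hc, hL]
    · simp [hr, hc, hL]
  -- row ≥ 0, col ≥ 0
  have hrow : row = ((row.toNat : Nat) : Int) := by omega
  by_cases hL : ((split1 s.toList).length : Int) ≤ row
  · have hnone : lineStart s.toList row 0 = none := by
      rw [hrow]; exact lineStart_ge _ _ _ (by omega)
    simp [hr, hc, hL, hnone]
  · have hlt : row.toNat < (split1 s.toList).length := by omega
    have hsome : lineStart s.toList row 0 =
        some (0 + prefixLen row.toNat s.toList, s.toList.drop (prefixLen row.toNat s.toList)) := by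
      rw [hrow]; exact lineStart_lt _ _ _ hlt
    have hgd : PySem.List.pyGetD (split1 s.toList) row [] =
        ((split1 s.toList).drop row.toNat).headI := by
      rw [hrow, PySem.List.pyGetD_natCast]
      simp only [Int.toNat_natCast]
      rw [getD_eq_headI_drop _ _ hlt]
    have hll : lineLen (s.toList.drop (prefixLen row.toNat s.toList)) =
        ((split1 s.toList).drop row.toNat).headI.length := by
      rw [lineLen_eq, split1_drop _ _ hlt]
    have hsl : PySem.List.slice (split1 s.toList) none (some row) =
        (split1 s.toList).take row.toNat := by
      rw [PySem.List.slice_to _ (by omega)]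
    have hsum : (((split1 s.toList).take row.toNat).map (fun line => (line.length : Int) + 1)).sum
        = (prefixLen row.toNat s.toList : Int) := by
      rw [sum_map_cast]; rfl
    rw [if_neg (by omega : ¬(row < 0 ∨ ((split1 s.toList).length : Int) ≤ row)),
        if_neg (by omega : ¬(row < 0 ∨ col < 0)), hsome]
    simp only [hgd, hll, hsl, hsum, Nat.zero_add]
    split_ifs with h1 h2 <;> first | rfl | omega
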